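-- pv_equiv track=rewrite | github.com/omicverse/py-dada2 | pydada2/filter.py | _matches_iupac
-- ===== SOURCE A (Python) =====
-- def _matches_iupac(seq: str, primer: str, max_mismatch: int = 0) -> int:
--     """Find first index where ``primer`` matches ``seq`` allowing IUPAC ambiguous
--     codes in the primer. Returns -1 if no match.
--     """
--     iupac = {
--         "A": "A", "C": "C", "G": "G", "T": "T",
--         "R": "AG", "Y": "CT", "S": "CG", "W": "AT",
--         "K": "GT", "M": "AC", "B": "CGT", "D": "AGT",
--         "H": "ACT", "V": "ACG", "N": "ACGT",
--     }
--     n, m = len(seq), len(primer)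
--     if m > n:
--         return -1
--     for i in range(n - m + 1):
--         mm = 0
--         for j in range(m):
--             if seq[i + j] not in iupac.get(primer[j], primer[j]):
--                 mm += 1
--                 if mm > max_mismatch:
--                     break
--         else:
--             if mm <= max_mismatch:
--                 return i
--     return -1
-- ===== SOURCE B (Python) =====
-- def _matches_iupac(seq: str, primer: str, max_mismatch: int = 0) -> int:
--     """Column-major re-implementation: sweep primer positions once, keeping a
--     pruned list of (start, mismatches) candidate windows."""
--     iupac = {
--         "A": "A", "C": "C", "G": "G", "T": "T",
--         "R": "AG", "Y": "CT", "S": "CG", "W": "AT",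
--         "K": "GT", "M": "AC", "B": "CGT", "D": "AGT",
--         "H": "ACT", "V": "ACG", "N": "ACGT",
--     }
--     n, m = len(seq), len(primer)
--     if m > n or max_mismatch < 0:
--         return -1
--     cands = [(i, 0) for i in range(n - m + 1)]
--     for j, p in enumerate(primer):
--         allowed = iupac.get(p, p)
--         new = []
--         for i, mm in cands:
--             if seq[i + j] not in allowed:
--                 mm += 1
--             if mm <= max_mismatch:
--                 new.append((i, mm))
--         cands = new
--     return cands[0][0] if cands else -1
-- ===== Notes on version B (the rewrite author's own statement) =====
-- stated objective: alternative
-- what changed: replaces A's row-major scan (per-window inner loop with break) by a single column-major sweep over primer positions that maintains a pruned list of (start, mismatch-count) candidate windows and returns the head survivor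
import Mathlib
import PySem

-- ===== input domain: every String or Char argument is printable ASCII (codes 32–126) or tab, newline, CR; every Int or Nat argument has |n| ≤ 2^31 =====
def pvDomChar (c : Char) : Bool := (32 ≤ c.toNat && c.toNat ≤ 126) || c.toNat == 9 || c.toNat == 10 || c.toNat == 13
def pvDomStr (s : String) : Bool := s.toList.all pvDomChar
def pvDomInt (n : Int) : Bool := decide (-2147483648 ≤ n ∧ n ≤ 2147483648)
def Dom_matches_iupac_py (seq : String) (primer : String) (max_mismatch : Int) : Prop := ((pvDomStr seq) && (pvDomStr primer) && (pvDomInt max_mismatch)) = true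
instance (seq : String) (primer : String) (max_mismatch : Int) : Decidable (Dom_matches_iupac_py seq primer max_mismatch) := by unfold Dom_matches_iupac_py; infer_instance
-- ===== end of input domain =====

-- B replaces A's row-major per-window scan (with break) by a single column-major
-- sweep over primer positions that maintains a pruned candidate list (objective: alternative).

-- ===== PORT A =====

-- iupac.get(c, c) as a list of allowed characters
def pvIupac (c : Char) : List Char :=
  match c with
  | 'A' => ['A'] | 'C' => ['C'] | 'G' => ['G'] | 'T' => ['T']
  | 'R' => ['A','G'] | 'Y' => ['C','T'] | 'S' => ['C','G'] | 'W' => ['A','T']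
  | 'K' => ['G','T'] | 'M' => ['A','C'] | 'B' => ['C','G','T'] | 'D' => ['A','G','T']
  | 'H' => ['A','C','T'] | 'V' => ['A','C','G'] | 'N' => ['A','C','G','T']
  | _ => [c]

-- A's inner 'for j in range(m)' loop, iterating the primer chars with index j and
-- counter mm; 'none' encodes 'break', 'some mm' the loop completing (for-else).
-- Indices i+j are always in range there, so List.getD is exact for seq[i + j].
def pvInnerA (s : List Char) (i : Nat) (maxmm : Int) : List Char → Nat → Int → Option Int
  | [], _, mm => some mm
  | pc :: ps, j, mm =>
    if (s.getD (i + j) ' ') ∈ pvIupac pc then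
      pvInnerA s i maxmm ps (j + 1) mm
    else
      if maxmm < mm + 1 then none else pvInnerA s i maxmm ps (j + 1) (mm + 1)

-- A's outer 'for i in range(n - m + 1)' loop
def pvOuterA (s p : List Char) (maxmm : Int) : List Nat → Int
  | [] => -1
  | i :: is =>
    match pvInnerA s i maxmm p 0 0 with
    | some mm => if mm ≤ maxmm then (i : Int) else pvOuterA s p maxmm is
    | none => pvOuterA s p maxmm is

def matches_iupac_py (seq : String) (primer : String) (max_mismatch : Int) : Int :=
  let s := seq.toList
  let p := primer.toList
  if p.length > s.length then -1
  else pvOuterA s p max_mismatch (List.range (s.length - p.length + 1))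

-- ===== PORT B =====

-- one column j of B: update each candidate's mismatch count, keep it if still ≤ max
def pvStepB (s : List Char) (maxmm : Int) (allowed : List Char) (j : Nat)
    (cands : List (Nat × Int)) : List (Nat × Int) :=
  cands.filterMap (fun c =>
    let mm := if (s.getD (c.1 + j) ' ') ∈ allowed then c.2 else c.2 + 1
    if mm ≤ maxmm then some (c.1, mm) else none)

-- B's 'for j, p in enumerate(primer)' loop
def pvLoopB (s : List Char) (maxmm : Int) : List Char → Nat → List (Nat × Int) → List (Nat × Int)
  | [], _, cands => cands
  | pc :: ps, j, cands => pvLoopB s maxmm ps (j + 1) (pvStepB s maxmm (pvIupac pc) j cands)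

-- 'cands[0][0] if cands else -1'
def pvHeadB (cands : List (Nat × Int)) : Int :=
  match cands with
  | [] => -1
  | c :: _ => (c.1 : Int)

def matches_iupac_py_alt (seq : String) (primer : String) (max_mismatch : Int) : Int :=
  let s := seq.toList
  let p := primer.toList
  if p.length > s.length ∨ max_mismatch < 0 then -1
  else
    pvHeadB (pvLoopB s max_mismatch p 0
      ((List.range (s.length - p.length + 1)).map (fun i => (i, (0 : Int)))))

-- ===== PRECONDITION & SPEC =====
def Spec_matches_iupac_py (seq : String) (primer : String) (max_mismatch : Int) (out : Int) : Prop := out = matches_iupac_py_alt seq primer max_mismatch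
instance (seq : String) (primer : String) (max_mismatch : Int) (out : Int) : Decidable (Spec_matches_iupac_py seq primer max_mismatch out) := by unfold Spec_matches_iupac_py; infer_instance

-- ===== CLAIM (what is proved, stated in full; the proofs are below) =====
def Claim_equal_matches_iupac_py : Prop := ∀ (seq : String) (primer : String) (max_mismatch : Int), Dom_matches_iupac_py seq primer max_mismatch → Spec_matches_iupac_py seq primer max_mismatch (matches_iupac_py seq primer max_mismatch)

-- ===== LEMMAS AND PROOFS =====

-- mismatch count of window i against the primer suffix ps starting at column j
def pvCnt (s : List Char) : List Char → Nat → Nat → Nat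
  | [], _, _ => 0
  | pc :: ps, j, i =>
    (if (s.getD (i + j) ' ') ∈ pvIupac pc then 0 else 1) + pvCnt s ps (j + 1) i

-- common specification: first window index whose full mismatch count is ≤ maxmm
def pvFind (s p : List Char) (maxmm : Int) : List Nat → Int
  | [] => -1
  | i :: is => if (pvCnt s p 0 i : Int) ≤ maxmm then (i : Int) else pvFind s p maxmm is

lemma innerA_char (s : List Char) (i : Nat) (maxmm : Int) :
    ∀ (ps : List Char) (j : Nat) (mm : Int),
      (match pvInnerA s i maxmm ps j mm with
        | some r => decide (r ≤ maxmm)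
        | none => false)
      = decide (mm + (pvCnt s ps j i : Int) ≤ maxmm) := by
  intro ps
  induction ps with
  | nil => intro j mm; simp only [pvInnerA, pvCnt, Nat.cast_zero, add_zero]
  | cons pc ps ih =>
    intro j mm
    simp only [pvInnerA, pvCnt]
    by_cases hmem : (s.getD (i + j) ' ') ∈ pvIupac pc
    · simp only [hmem, if_true, Nat.zero_add, ih (j + 1) mm]
    · simp only [hmem, if_false]
      by_cases hbr : maxmm < mm + 1
      · simp only [hbr, if_true]
        rw [eq_comm, decide_eq_false_iff_not]
        push_cast
        omega
      · simp only [hbr, if_false, ih (j + 1) (mm + 1), decide_eq_decide]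
        push_cast
        omega

lemma outerA_eq_find (s p : List Char) (maxmm : Int) :
    ∀ is : List Nat, pvOuterA s p maxmm is = pvFind s p maxmm is := by
  intro is
  induction is with
  | nil => rfl
  | cons i is ih =>
    have h := innerA_char s i maxmm p 0 0
    rw [zero_add] at h
    rcases hres : pvInnerA s i maxmm p 0 0 with _ | r <;> rw [hres] at h
    · by_cases hc : (pvCnt s p 0 i : Int) ≤ maxmm
      · simp [hc] at h
      · simp [pvOuterA, hres, pvFind, hc, ih]
    · by_cases hc : (pvCnt s p 0 i : Int) ≤ maxmm
      · have hr : r ≤ maxmm := by simpa [hc] using h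
        simp [pvOuterA, hres, pvFind, hc, hr]
      · have hr : ¬ r ≤ maxmm := by simpa [hc] using h
        simp [pvOuterA, hres, pvFind, hc, hr, ih]

lemma loopB_char (s : List Char) (maxmm : Int) :
    ∀ (ps : List Char) (j : Nat) (cands : List (Nat × Int)),
      (∀ c ∈ cands, c.2 ≤ maxmm) →
      pvLoopB s maxmm ps j cands
        = cands.filterMap (fun c =>
            if c.2 + (pvCnt s ps j c.1 : Int) ≤ maxmm then
              some (c.1, c.2 + (pvCnt s ps j c.1 : Int)) else none) := by
  intro ps
  induction ps with
  | nil =>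
    intro j cands hb
    induction cands with
    | nil => rfl
    | cons c cs ihc =>
      have hc : c.2 ≤ maxmm := hb c (by simp)
      have hcs := ihc (fun d hd => hb d (by simp [hd]))
      simp only [pvLoopB, pvCnt, Nat.cast_zero, add_zero, List.filterMap_cons, if_pos hc] at hcs ⊢
      rw [← hcs]
  | cons pc ps ih =>
    intro j cands hb
    have hstep : ∀ c ∈ pvStepB s maxmm (pvIupac pc) j cands, c.2 ≤ maxmm := by
      intro c hc
      simp only [pvStepB, List.mem_filterMap] at hc
      obtain ⟨d, _, hd⟩ := hc
      rw [Option.ite_none_right_eq_some, Option.some.injEq] at hd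
      obtain ⟨hle, rfl⟩ := hd
      exact hle
    rw [pvLoopB, ih (j + 1) _ hstep, pvStepB, List.filterMap_filterMap]
    apply List.filterMap_congr
    intro c _
    simp only [pvCnt]
    by_cases hm : (s.getD (c.1 + j) ' ') ∈ pvIupac pc
    · by_cases h1 : c.2 ≤ maxmm
      · simp only [hm, if_true, h1, Nat.zero_add, Option.bind]
      · have : ¬ (c.2 + ((0 + pvCnt s ps (j + 1) c.1 : Nat) : Int) ≤ maxmm) := by
          push_cast; omega
        simp only [hm, if_true, h1, if_false, this, Option.bind]
    · by_cases h1 : c.2 + 1 ≤ maxmm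
      · have h2 : c.2 + 1 + (pvCnt s ps (j + 1) c.1 : Int)
            = c.2 + ((1 + pvCnt s ps (j + 1) c.1 : Nat) : Int) := by push_cast; ring
        simp only [hm, if_false, h1, if_true, Option.bind, h2]
      · have : ¬ (c.2 + ((1 + pvCnt s ps (j + 1) c.1 : Nat) : Int) ≤ maxmm) := by
          push_cast; omega
        simp only [hm, if_false, h1, this, Option.bind]

lemma head_filterMap_eq_find (s p : List Char) (maxmm : Int) :
    ∀ l : List Nat,
      pvHeadB ((l.map (fun i => (i, (0 : Int)))).filterMap (fun c =>
          if c.2 + (pvCnt s p 0 c.1 : Int) ≤ maxmm then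
            some (c.1, c.2 + (pvCnt s p 0 c.1 : Int)) else none))
      = pvFind s p maxmm l := by
  intro l
  induction l with
  | nil => rfl
  | cons i is ih =>
    simp only [List.map_cons, List.filterMap_cons, zero_add]
    by_cases hc : (pvCnt s p 0 i : Int) ≤ maxmm
    · simp [pvHeadB, pvFind, hc]
    · simp only [pvFind, hc, if_false]
      exact ih

lemma find_neg (s p : List Char) (maxmm : Int) (hneg : maxmm < 0) :
    ∀ l : List Nat, pvFind s p maxmm l = -1 := by
  intro l
  induction l with
  | nil => rfl
  | cons i is ih =>
    have hc : ¬ ((pvCnt s p 0 i : Int) ≤ maxmm) := by omega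
    simp [pvFind, hc, ih]

-- ===== VERDICT (by name: the statement is the Claim_ definition above) =====
theorem matches_iupac_py_spec : Claim_equal_matches_iupac_py := by
  intro seq primer maxmm _
  show matches_iupac_py seq primer maxmm = matches_iupac_py_alt seq primer maxmm
  unfold matches_iupac_py matches_iupac_py_alt
  set s := seq.toList
  set p := primer.toList
  by_cases hlen : p.length > s.length
  · simp [hlen]
  · by_cases hneg : maxmm < 0
    · have hg : p.length > s.length ∨ maxmm < 0 := Or.inr hneg
      rw [if_neg hlen, if_pos hg, outerA_eq_find, find_neg s p maxmm hneg]
    · have hg : ¬ (p.length > s.length ∨ maxmm < 0) := by tauto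
      have hb : ∀ c ∈ (List.range (s.length - p.length + 1)).map (fun i => (i, (0 : Int))),
          c.2 ≤ maxmm := by
        intro c hc
        simp only [List.mem_map] at hc
        obtain ⟨i, _, rfl⟩ := hc
        omega
      rw [if_neg hlen, if_neg hg, outerA_eq_find, loopB_char s maxmm p 0 _ hb,
        head_filterMap_eq_find s p maxmm (List.range (s.length - p.length + 1))]
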